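-- pv_equiv track=rewrite | github.com/pkemkes/advent-of-code | 2023/09/solution.py | extrapolate_back
-- ===== SOURCE A (Python) =====
-- from typing import List
--
-- def calc_differences(val_history: List[int]) -> List[int]:
--     return [val_history[i] - val_history[i-1]
--             for i in range(1, len(val_history))]
--
-- def extrapolate_back(val_history: List[int]) -> int:
--     differences = [val_history]
--     while not all(d == 0 for d in differences[-1]):
--         differences.append(calc_differences(differences[-1]))
--     differences[-1].append(0)
--     for i in range(len(differences)-1, -1, -1):
--         differences[i-1].append(
--             differences[i][-1] + differences[i-1][-1]
--         )
--     return differences[0][-1]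
-- ===== SOURCE B (Python) =====
-- from typing import List
--
-- def extrapolate_back(val_history: List[int]) -> int:
--     # Newton forward-difference closed form:
--     # next = sum_{k<n} (-1)^(n-1-k) * C(n,k) * v[k], one O(n) pass.
--     n = len(val_history)
--     total = 0
--     c = 1                      # running binomial C(n, k)
--     sign = 1 if n % 2 == 1 else -1   # (-1)^(n-1)
--     for k, v in enumerate(val_history):
--         total += sign * c * v
--         c = c * (n - k) // (k + 1)
--         sign = -sign
--     return total
-- ===== Notes on version B (the rewrite author's own statement) =====
-- stated objective: faster
-- what changed: Replaced the O(n^2) iterated difference table plus back-fill loop by Newton's forward-difference closed form: a single O(n) pass summing (-1)^(n-1-k)*C(n,k)*v[k] with a running binomial coefficient.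
import Mathlib
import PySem

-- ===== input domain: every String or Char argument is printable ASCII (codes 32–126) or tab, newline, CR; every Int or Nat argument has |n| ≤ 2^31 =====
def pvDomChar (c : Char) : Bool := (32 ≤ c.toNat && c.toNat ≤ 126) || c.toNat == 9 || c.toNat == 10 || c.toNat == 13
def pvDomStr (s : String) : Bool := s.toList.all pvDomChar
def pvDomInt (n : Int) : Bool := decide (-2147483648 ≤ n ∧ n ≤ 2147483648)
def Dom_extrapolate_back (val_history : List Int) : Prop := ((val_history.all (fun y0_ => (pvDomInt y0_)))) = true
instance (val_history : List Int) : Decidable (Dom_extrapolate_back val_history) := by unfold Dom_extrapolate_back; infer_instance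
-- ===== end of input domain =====

-- B replaces A's O(n^2) difference table by Newton's forward-difference closed form (one O(n) pass).
-- Equivalence is about the RETURN value only: Python A mutates val_history in place (appends to it), B does not.

-- ===== PORT A =====
def calc_differences (val_history : List Int) : List Int :=
  (PySem.List.pyRange 1 (PySem.List.len val_history) 1).map
    (fun i => PySem.List.pyGetD val_history i 0 - PySem.List.pyGetD val_history (i - 1) 0)

lemma calc_differences_length_lt (row : List Int) (h : row ≠ []) :
    (calc_differences row).length < row.length := by
  have : 0 < row.length := List.length_pos_iff.mpr h
  simp [calc_differences, PySem.List.length_pyRange_one, PySem.List.len_eq]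
  omega

-- the while loop of A: the list `differences` of rows, last row all zeros
def buildDiffs (row : List Int) : List (List Int) :=
  if row.all (· == 0) then [row]
  else row :: buildDiffs (calc_differences row)
termination_by row.length
decreasing_by
  exact calc_differences_length_lt row (by rintro rfl; simp at *)

-- the back-fill loop: e_m = 0 (the appended 0), e_{i-1} = e_i + row_{i-1}[-1]; A returns e_0
def extrapolate_back (val_history : List Int) : Int :=
  ((buildDiffs val_history).dropLast).foldr
    (fun r acc => acc + PySem.List.pyGetD r (-1) 0) 0

-- ===== PORT B =====
def altLoop (n : Int) (vs : List Int) (k : Int) (total c sign : Int) : Int :=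
  match vs with
  | [] => total
  | v :: rest =>
      altLoop n rest (k + 1) (total + sign * c * v)
        (PySem.Int.floordiv (c * (n - k)) (k + 1)) (-sign)

def extrapolate_back_alt (val_history : List Int) : Int :=
  altLoop (PySem.List.len val_history) val_history 0 0 1
    (if PySem.Int.mod (PySem.List.len val_history) 2 == 1 then 1 else -1)

-- ===== PRECONDITION & SPEC =====
def Spec_extrapolate_back (val_history : List Int) (out : Int) : Prop := out = extrapolate_back_alt val_history
instance (val_history : List Int) (out : Int) : Decidable (Spec_extrapolate_back val_history out) := by unfold Spec_extrapolate_back; infer_instance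

-- ===== CLAIM (what is proved, stated in full; the proofs are below) =====
def Claim_equal_extrapolate_back : Prop := ∀ (val_history : List Int), Dom_extrapolate_back val_history → Spec_extrapolate_back val_history (extrapolate_back val_history)

-- ===== LEMMAS AND PROOFS =====

-- the common mathematical value: the Newton forward-difference sum
def N (v : List Int) : Int :=
  ∑ k ∈ Finset.range v.length,
    (-1 : Int) ^ (v.length + 1) * (-1 : Int) ^ k * (v.length.choose k : Int) * v.getD k 0

lemma calc_differences_eq (l : List Int) :
    calc_differences l =
      (List.range (l.length - 1)).map (fun k => l.getD (k + 1) 0 - l.getD k 0) := by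
  unfold calc_differences
  rw [PySem.List.len_eq, PySem.List.pyRange_one, List.map_map]
  have hlen : ((l.length : Int) - 1).toNat = l.length - 1 := by omega
  rw [hlen]
  apply List.map_congr_left
  intro k hk
  have h2 : (1 : Int) + (k : Int) - 1 = ((k : Nat) : Int) := by ring
  have h1 : (1 : Int) + (k : Int) = ((k + 1 : Nat) : Int) := by push_cast; ring
  simp only [Function.comp]
  rw [h2, h1, PySem.List.pyGetD_natCast, PySem.List.pyGetD_natCast]

lemma calc_differences_len (l : List Int) :
    (calc_differences l).length = l.length - 1 := by
  simp [calc_differences_eq]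

lemma calc_differences_getD (l : List Int) (j : Nat) (hj : j < l.length - 1) :
    (calc_differences l).getD j 0 = l.getD (j + 1) 0 - l.getD j 0 := by
  rw [calc_differences_eq]
  rw [List.getD_eq_getElem _ _ (by simpa using hj)]
  simp

lemma N_allzero (v : List Int) (h : v.all (· == 0) = true) : N v = 0 := by
  unfold N
  apply Finset.sum_eq_zero
  intro k hk
  have hk' : k < v.length := Finset.mem_range.mp hk
  have hz : v.getD k 0 = 0 := by
    rw [List.getD_eq_getElem _ _ hk']
    have := List.all_eq_true.mp h v[k] (List.getElem_mem hk')
    simpa using this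
  rw [hz, mul_zero]

-- Newton step: for nonempty v, N v = v[-1] + N (differences of v)
lemma newton_step (v : List Int) (hv : v ≠ []) :
    N v = PySem.List.pyGetD v (-1) 0 + N (calc_differences v) := by
  obtain ⟨m, hm⟩ : ∃ m, v.length = m + 1 :=
    ⟨v.length - 1, by have := List.length_pos_iff.mpr hv; omega⟩
  have hlast : PySem.List.pyGetD v (-1) 0 = v.getD m 0 := by
    rw [PySem.List.pyGetD_neg_one v 0 hv, List.getLast_eq_getElem,
      List.getD_eq_getElem _ _ (by omega)]
    congr 1
    omega
  have hdl : (calc_differences v).length = m := by rw [calc_differences_len, hm]; omega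
  unfold N
  rw [hm, hdl, hlast]
  have hdiffD : ∀ j ∈ Finset.range m,
      (-1 : Int) ^ (m + 1) * (-1 : Int) ^ j * ((m.choose j : Nat) : Int) * (calc_differences v).getD j 0
        = (-1 : Int) ^ (m + 1) * (-1 : Int) ^ j * ((m.choose j : Nat) : Int) * (v.getD (j + 1) 0 - v.getD j 0) := by
    intro j hj
    rw [calc_differences_getD v j (by simp at hj; omega)]
  rw [Finset.sum_congr rfl hdiffD, Finset.sum_range_succ']
  have hsplitL : ∀ k ∈ Finset.range m,
      (-1 : Int) ^ (m + 1 + 1) * (-1 : Int) ^ (k + 1) * (((m + 1).choose (k + 1) : Nat) : Int) * v.getD (k + 1) 0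
        = (-((-1 : Int) ^ m) * (-1 : Int) ^ k * ((m.choose k : Nat) : Int) * v.getD (k + 1) 0)
          + ((-1 : Int) ^ m * (-1 : Int) ^ (k + 1) * ((m.choose (k + 1) : Nat) : Int) * v.getD (k + 1) 0) := by
    intro k hk
    rw [Nat.choose_succ_succ]
    push_cast
    simp only [pow_succ]
    ring
  rw [Finset.sum_congr rfl hsplitL, Finset.sum_add_distrib]
  have hsplitR : ∀ j ∈ Finset.range m,
      (-1 : Int) ^ (m + 1) * (-1 : Int) ^ j * ((m.choose j : Nat) : Int) * (v.getD (j + 1) 0 - v.getD j 0)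
        = (-((-1 : Int) ^ m) * (-1 : Int) ^ j * ((m.choose j : Nat) : Int) * v.getD (j + 1) 0)
          + ((-1 : Int) ^ m * (-1 : Int) ^ j * ((m.choose j : Nat) : Int) * v.getD j 0) := by
    intro j hj
    simp only [pow_succ]
    ring
  rw [Finset.sum_congr rfl hsplitR, Finset.sum_add_distrib]
  -- telescoping: sum of H (k+1) plus H 0 equals sum of H k plus H m, for H k = (-1)^m (-1)^k C(m,k) v_k
  have htel := Finset.sum_range_succ'
    (fun k => (-1 : Int) ^ m * (-1 : Int) ^ k * ((m.choose k : Nat) : Int) * v.getD k 0) m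
  have htel2 := Finset.sum_range_succ
    (fun k => (-1 : Int) ^ m * (-1 : Int) ^ k * ((m.choose k : Nat) : Int) * v.getD k 0) m
  have hHm : (-1 : Int) ^ m * (-1 : Int) ^ m * ((m.choose m : Nat) : Int) * v.getD m 0 = v.getD m 0 := by
    have : (-1 : Int) ^ m * (-1 : Int) ^ m = 1 := by
      rw [← pow_add]
      exact Even.neg_one_pow ⟨m, by ring⟩
    rw [Nat.choose_self, this]
    simp
  have hH0 : (-1 : Int) ^ (m + 1 + 1) * (-1 : Int) ^ 0 * (((m + 1).choose 0 : Nat) : Int) * v.getD 0 0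
      = (-1 : Int) ^ m * (-1 : Int) ^ 0 * ((m.choose 0 : Nat) : Int) * v.getD 0 0 := by
    simp only [pow_succ]
    simp
  rw [hH0]
  simp only [] at htel htel2
  rw [htel2] at htel
  -- htel : ∑ H k + H m = ∑ H (k+1) + H 0  (up to direction)
  linarith [htel, hHm]

-- one-step recursion satisfied by port A
lemma buildDiffs_ne_nil (v : List Int) : buildDiffs v ≠ [] := by
  rw [buildDiffs]
  split <;> simp

lemma A_rec (v : List Int) :
    extrapolate_back v =
      if v.all (· == 0) then 0
      else PySem.List.pyGetD v (-1) 0 + extrapolate_back (calc_differences v) := by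
  unfold extrapolate_back
  rw [buildDiffs]
  split
  · simp
  · rw [List.dropLast_cons_of_ne_nil (buildDiffs_ne_nil _), List.foldr_cons]
    ring

theorem A_eq_N (v : List Int) : extrapolate_back v = N v := by
  rw [A_rec v]
  split_ifs with h
  · exact (N_allzero v h).symm
  · have hv : v ≠ [] := by rintro rfl; simp at h
    rw [A_eq_N (calc_differences v), ← newton_step v hv]
termination_by v.length
decreasing_by
  exact calc_differences_length_lt v hv

-- B side: loop invariant for altLoop
lemma altLoop_eq (n : Nat) (vs : List Int) (k : Nat) (h : k + vs.length = n) (sign total : Int) :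
    altLoop (n : Int) vs (k : Int) total ((n.choose k : Nat) : Int) sign
      = total + ∑ j ∈ Finset.range vs.length,
          sign * (-1 : Int) ^ j * ((n.choose (k + j) : Nat) : Int) * vs.getD j 0 := by
  induction vs generalizing k sign total with
  | nil => simp [altLoop]
  | cons v rest ih =>
    rw [altLoop]
    have hk : k < n := by simp at h; omega
    have hc : PySem.Int.floordiv (((n.choose k : Nat) : Int) * ((n : Int) - (k : Int))) ((k : Int) + 1)
        = ((n.choose (k + 1) : Nat) : Int) := by
      have hsub : (n : Int) - (k : Int) = ((n - k : Nat) : Int) := by omega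
      have hk1 : ((k : Int) + 1) = ((k + 1 : Nat) : Int) := by push_cast; ring
      rw [hsub, hk1, ← Nat.cast_mul, PySem.Int.floordiv_natCast]
      congr 1
      rw [← Nat.choose_succ_right_eq]
      exact Nat.mul_div_cancel _ (by omega)
    rw [hc]
    have hk1 : (k : Int) + 1 = ((k + 1 : Nat) : Int) := by push_cast; ring
    rw [hk1, ih (k + 1) (by simp at h ⊢; omega)]
    rw [List.length_cons, Finset.sum_range_succ']
    have hterm : ∀ j ∈ Finset.range rest.length,
        -sign * (-1 : Int) ^ j * ((n.choose (k + 1 + j) : Nat) : Int) * rest.getD j 0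
          = sign * (-1 : Int) ^ (j + 1) * ((n.choose (k + (j + 1)) : Nat) : Int) * (v :: rest).getD (j + 1) 0 := by
      intro j hj
      rw [List.getD_cons_succ, show k + 1 + j = k + (j + 1) by omega]
      simp only [pow_succ]
      ring
    rw [Finset.sum_congr rfl hterm]
    simp only [List.getD_cons_zero, Nat.add_zero, pow_zero]
    ring

lemma alt_eq_N (v : List Int) : extrapolate_back_alt v = N v := by
  unfold extrapolate_back_alt
  rw [PySem.List.len_eq]
  have hsgn : (if PySem.Int.mod ((v.length : Nat) : Int) 2 == 1 then (1 : Int) else -1)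
      = (-1 : Int) ^ (v.length + 1) := by
    have hm2 : PySem.Int.mod ((v.length : Nat) : Int) 2 = ((v.length % 2 : Nat) : Int) := by
      have := PySem.Int.mod_natCast v.length 2
      exact_mod_cast this
    rcases Nat.even_or_odd v.length with he | ho
    · have h0 : v.length % 2 = 0 := Nat.even_iff.mp he
      rw [hm2, h0]
      have : Odd (v.length + 1) := Even.add_one he
      simp [this.neg_one_pow]
    · have h1 : v.length % 2 = 1 := Nat.odd_iff.mp ho
      rw [hm2, h1]
      have : Even (v.length + 1) := Odd.add_one ho
      simp [this.neg_one_pow]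
  rw [hsgn]
  have key := altLoop_eq v.length v 0 (by simp) ((-1 : Int) ^ (v.length + 1)) 0
  simp only [Nat.cast_zero, Nat.choose_zero_right, Nat.cast_one, zero_add] at key
  rw [key]
  unfold N
  rfl

-- ===== VERDICT (by name: the statement is the Claim_ definition above) =====
theorem extrapolate_back_spec : Claim_equal_extrapolate_back := by
  intro v _
  unfold Spec_extrapolate_back
  rw [A_eq_N, alt_eq_N]
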